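-- pv_equiv track=rewrite | github.com/rameshwarsingh11/data-structure-practice | max_candies.py | max_candies1
-- ===== SOURCE A (Python) =====
-- def max_candies1(arr, k):
--   arr.sort()
--   maxValues = arr[-k:]
--   maxList = []
--   for i in range(len(maxValues)):
--     maxList.append(max(maxValues))
--     maxValues[maxValues.index(max(maxValues))] //= 2
--   return sum(maxList)
-- ===== SOURCE B (Python) =====
-- def max_candies1(arr, k):
--     # Maintain the pool as a descending-ordered list: take the head as the
--     # current max, then re-insert its half at its ordered position.
--     arr.sort()
--     heap = arr[-k:][::-1]
--     total = 0
--     for _ in range(len(heap)):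
--         m = heap[0]
--         total += m
--         v = m // 2
--         rest = heap[1:]
--         i = 0
--         while i < len(rest) and rest[i] >= v:
--             i += 1
--         rest.insert(i, v)
--         heap = rest
--     return total
-- ===== Notes on version B (the rewrite author's own statement) =====
-- stated objective: alternative
-- what changed: A repeatedly rescans an unordered list (max twice plus .index) and overwrites in place, summing a collected list at the end; B keeps the pool as a descending-ordered list, pops the head as the max and re-inserts its half at its ordered position, accumulating a running total.
import Mathlib
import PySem

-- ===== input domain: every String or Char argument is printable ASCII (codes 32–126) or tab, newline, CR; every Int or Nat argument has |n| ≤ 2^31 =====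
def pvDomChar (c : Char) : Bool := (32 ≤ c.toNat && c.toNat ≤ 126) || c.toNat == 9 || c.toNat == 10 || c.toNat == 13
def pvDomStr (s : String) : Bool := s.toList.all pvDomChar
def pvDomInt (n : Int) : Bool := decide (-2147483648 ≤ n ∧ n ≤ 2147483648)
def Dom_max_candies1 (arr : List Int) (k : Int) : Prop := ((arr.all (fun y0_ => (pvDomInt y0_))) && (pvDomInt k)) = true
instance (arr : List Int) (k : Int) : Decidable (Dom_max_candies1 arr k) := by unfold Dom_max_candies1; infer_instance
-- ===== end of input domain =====

-- B replaces A's repeated max/index rescans of an unordered list by a descending-ordered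
-- list popped at the head with ordered re-insertion of the halved value (objective: alternative).
-- Both A and B sort `arr` in place (same side effect); the theorem is about the return value.

-- ===== PORT A =====
-- for i in range(len(maxValues)): maxList.append(max(maxValues)); maxValues[maxValues.index(max(maxValues))] //= 2
def loopA (fuel : Nat) (mv ml : List Int) : List Int × List Int :=
  match fuel with
  | 0 => (mv, ml)
  | n + 1 =>
    match PySem.List.max? mv (fun y => y) with
    | none => (mv, ml)       -- unreachable guard: Python max([]) raises, but fuel = len mv > 0
    | some m =>
      let ml' := ml ++ [m]
      match PySem.List.index? mv m with
      | none => (mv, ml')    -- unreachable guard: m ∈ mv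
      | some i => loopA n (PySem.List.pySetD mv (i : Int) (PySem.Int.floordiv m 2)) ml'

def max_candies1 (arr : List Int) (k : Int) : Int :=
  let sortedArr := PySem.List.sorted arr (fun x => x) false
  let maxValues := PySem.List.slice sortedArr (some (-k)) none   -- arr[-k:]
  (loopA maxValues.length maxValues []).2.sum

-- ===== PORT B =====
-- while i < len(rest) and rest[i] >= v: i += 1
def insertPos (h : List Int) (v : Int) : Nat :=
  match h with
  | [] => 0
  | x :: t => if v ≤ x then insertPos t v + 1 else 0

def loopB (fuel : Nat) (heap : List Int) (total : Int) : Int :=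
  match fuel with
  | 0 => total
  | n + 1 =>
    match heap with
    | [] => total            -- unreachable guard: Python heap[0] raises, but fuel = len heap > 0
    | m :: rest =>
      let v := PySem.Int.floordiv m 2
      loopB n (PySem.List.insert rest ((insertPos rest v : Nat) : Int) v) (total + m)

def max_candies1_alt (arr : List Int) (k : Int) : Int :=
  let sortedArr := PySem.List.sorted arr (fun x => x) false
  let heap := (PySem.List.slice sortedArr (some (-k)) none).reverse   -- arr[-k:][::-1]
  loopB heap.length heap 0

-- ===== PRECONDITION & SPEC =====
def Spec_max_candies1 (arr : List Int) (k : Int) (out : Int) : Prop := out = max_candies1_alt arr k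
instance (arr : List Int) (k : Int) (out : Int) : Decidable (Spec_max_candies1 arr k out) := by unfold Spec_max_candies1; infer_instance

-- ===== CLAIM (what is proved, stated in full; the proofs are below) =====
def Claim_equal_max_candies1 : Prop := ∀ (arr : List Int) (k : Int), Dom_max_candies1 arr k → Spec_max_candies1 arr k (max_candies1 arr k)

-- ===== LEMMAS AND PROOFS =====

lemma loopB_shift (n : Nat) (h : List Int) (t : Int) : loopB n h t = t + loopB n h 0 := by
  induction n generalizing h t with
  | zero => simp [loopB]
  | succ n ih =>
    cases h with
    | nil => simp [loopB]
    | cons m rest =>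
      simp only [loopB]
      rw [ih, ih (t := 0 + m)]
      ring

lemma insertPos_le (h : List Int) (v : Int) : insertPos h v ≤ h.length := by
  induction h with
  | nil => simp [insertPos]
  | cons x t ih =>
    by_cases hx : v ≤ x <;> simp [insertPos, hx]
    omega

-- the scan stops at the takeWhile boundary
lemma insertPos_eq (h : List Int) (v : Int) :
    insertPos h v = (h.takeWhile (fun x => decide (v ≤ x))).length := by
  induction h with
  | nil => simp [insertPos]
  | cons x t ih =>
    by_cases hx : v ≤ x <;> simp [insertPos, hx, ih]

lemma insert_insertPos (h : List Int) (v : Int) :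
    PySem.List.insert h ((insertPos h v : Nat) : Int) v =
      h.takeWhile (fun x => decide (v ≤ x)) ++ v :: h.dropWhile (fun x => decide (v ≤ x)) := by
  rw [PySem.List.insert_natCast h (insertPos h v) v (insertPos_le h v), insertPos_eq]
  induction h with
  | nil => simp
  | cons x t ih =>
    by_cases hx : v ≤ x <;>
      simp [hx, ih]

lemma perm_insert (h : List Int) (v : Int) :
    (PySem.List.insert h ((insertPos h v : Nat) : Int) v).Perm (v :: h) := by
  rw [insert_insertPos]
  calc (h.takeWhile (fun x => decide (v ≤ x)) ++ v :: h.dropWhile (fun x => decide (v ≤ x))).Perm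
        (v :: (h.takeWhile (fun x => decide (v ≤ x)) ++ h.dropWhile (fun x => decide (v ≤ x)))) :=
        List.perm_middle
    _ = (v :: h) := by rw [List.takeWhile_append_dropWhile]

lemma dropWhile_le (h : List Int) (v : Int) (hp : h.Pairwise (fun a b => b ≤ a)) :
    ∀ b ∈ h.dropWhile (fun x => decide (v ≤ x)), b ≤ v := by
  induction h with
  | nil => simp
  | cons x t ih =>
    intro b hb
    by_cases hx : v ≤ x
    · rw [List.dropWhile_cons, if_pos (by simpa using hx)] at hb
      exact ih (List.pairwise_cons.mp hp).2 b hb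
    · rw [List.dropWhile_cons, if_neg (by simpa using hx)] at hb
      rcases List.mem_cons.mp hb with rfl | hb'
      · omega
      · have := List.rel_of_pairwise_cons hp hb'
        omega

lemma pairwise_insert (h : List Int) (v : Int) (hp : h.Pairwise (fun a b => b ≤ a)) :
    (PySem.List.insert h ((insertPos h v : Nat) : Int) v).Pairwise (fun a b => b ≤ a) := by
  rw [insert_insertPos]
  set p : Int → Bool := fun x => decide (v ≤ x) with hpdef
  have hsplit : (h.takeWhile p ++ h.dropWhile p).Pairwise (fun a b => b ≤ a) := by
    rw [List.takeWhile_append_dropWhile]; exact hp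
  rw [List.pairwise_append] at hsplit
  obtain ⟨ptw, pdw, cross⟩ := hsplit
  have htw : ∀ a ∈ h.takeWhile p, v ≤ a := by
    intro a ha
    have := List.mem_takeWhile_imp ha
    simpa [hpdef] using this
  have hdw : ∀ b ∈ h.dropWhile p, b ≤ v := dropWhile_le h v hp
  rw [List.pairwise_append]
  refine ⟨ptw, ?_, ?_⟩
  · rw [List.pairwise_cons]
    exact ⟨hdw, pdw⟩
  · intro a ha b hb
    rcases List.mem_cons.mp hb with rfl | hb'
    · exact htw a ha
    · exact le_trans (hdw b hb') (htw a ha)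

lemma loop_eq (n : Nat) (mv heap ml : List Int)
    (hperm : heap.Perm mv) (hp : heap.Pairwise (fun a b => b ≤ a)) :
    (loopA n mv ml).2.sum = ml.sum + loopB n heap 0 := by
  induction n generalizing mv heap ml with
  | zero => simp [loopA, loopB]
  | succ n ih =>
    cases heap with
    | nil =>
      have : mv = [] := hperm.symm.eq_nil  -- placeholder direction
      subst this
      simp [loopA, loopB, PySem.List.max?]
    | cons m rest =>
      -- the head of the descending heap is the (value of the) max of mv
      have hmem : m ∈ mv := hperm.mem_iff.mp (List.mem_cons_self ..)
      have hmvne : mv ≠ [] := List.ne_nil_of_mem hmem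
      obtain ⟨M, hM⟩ : ∃ M, PySem.List.max? mv (fun y => y) = some M := by
        cases hmax : PySem.List.max? mv (fun y => y) with
        | none => exact absurd ((PySem.List.max?_eq_none_iff mv (fun y => y)).mp hmax) hmvne
        | some M => exact ⟨M, rfl⟩
      have hMm : M = m := by
        have hMmem : M ∈ mv := PySem.List.max?_mem hM
        have h1 : m ≤ M := PySem.List.max?_isMax hM m hmem
        have h2 : M ≤ m := by
          rcases List.mem_cons.mp (hperm.mem_iff.mpr hMmem) with rfl | hM'
          · exact le_refl _
          · exact List.rel_of_pairwise_cons hp hM'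
        omega
      subst hMm
      -- decompose mv at the first occurrence of M
      obtain ⟨i, hidx⟩ : ∃ i, PySem.List.index? mv M = some i := by
        cases hI : PySem.List.index? mv M with
        | none => exact absurd ((PySem.List.index?_eq_none_iff mv M).mp hI) (by simp [hmem])
        | some i => exact ⟨i, rfl⟩
      obtain ⟨pre, suf, hdec, hlen, hnotin⟩ := (PySem.List.index?_eq_some_iff mv M i).mp hidx
      -- A's in-place update replaces the first occurrence of the max
      set v := PySem.Int.floordiv M 2 with hv
      have hset : PySem.List.pySetD mv (i : Int) v = pre ++ v :: suf := by
        rw [PySem.List.pySetD_natCast, hdec, ← hlen]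
        rw [List.set_append]
        simp
      -- multiset bookkeeping
      have hrest : rest.Perm (pre ++ suf) := by
        have h1 : (M :: rest).Perm (M :: (pre ++ suf)) :=
          hperm.trans (by rw [hdec]; exact List.perm_middle)
        exact h1.cons_inv
      have hperm' : (PySem.List.insert rest ((insertPos rest v : Nat) : Int) v).Perm
          (pre ++ v :: suf) :=
        (perm_insert rest v).trans ((hrest.cons v).trans List.perm_middle.symm)
      have hp' : (PySem.List.insert rest ((insertPos rest v : Nat) : Int) v).Pairwise
          (fun a b => b ≤ a) := pairwise_insert rest v (List.pairwise_cons.mp hp).2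
      simp only [loopA, loopB, hM, hidx]
      rw [← hv, hset]
      rw [ih (pre ++ v :: suf) _ (ml ++ [M]) hperm' hp']
      rw [loopB_shift n _ (0 + M)]
      simp
      ring

-- ===== VERDICT (by name: the statement is the Claim_ definition above) =====
theorem max_candies1_spec : Claim_equal_max_candies1 := by
  intro arr k _
  unfold Spec_max_candies1 max_candies1 max_candies1_alt
  set mv := PySem.List.slice (PySem.List.sorted arr (fun x => x) false) (some (-k)) none with hmv
  have hpw : mv.Pairwise (fun a b : Int => a ≤ b) := by
    rw [hmv, PySem.List.slice_some_none]
    exact (PySem.List.sorted_pairwise arr (fun x => x)).drop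
  have hpw' : mv.reverse.Pairwise (fun a b : Int => b ≤ a) := by
    rw [List.pairwise_reverse]
    exact hpw
  show (loopA mv.length mv []).2.sum = loopB mv.reverse.length mv.reverse 0
  rw [List.length_reverse]
  exact (loop_eq mv.length mv mv.reverse [] (mv.reverse_perm) hpw').trans (by simp)
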